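-- pv_equiv track=rewrite | github.com/nrkorte/320-algorithms | quiz.py | coins_in_a_line
-- ===== SOURCE A (Python) =====
-- def coins_in_a_line(coins):
--     n = len(coins)
--     M = [[0]*n for _ in range(n)]
--
--     # Initialize the diagonal entries
--     for i in range(n):
--         M[i][i] = coins[i]
--
--     # Compute the maximum value table for the even diagonals
--     for d in range(2, n+1, 2):
--         for i in range(n-d+1):
--             j = i + d - 1
--             if i+2 < n:
--                 left = coins[i] + min(M[i+2][j], M[i+1][j-1])
--             else:
--                 left = coins[i] + M[i+1][j-1]
--             if j-2 >= 0:
--                 right = coins[j] + min(M[i+1][j-1], M[i][j-2])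
--             else:
--                 right = coins[j] + M[i+1][j-1]
--             M[i][j] = max(left, right)
--
--     # Return the maximum amount the first player can win
--     return M[0][n-1], [M[0][j] for j in range(1, n, 2)], [M[i][n-1] for i in range(0, n, 2)], M
-- ===== SOURCE B (Python) =====
-- def coins_in_a_line(coins):
--     n = len(coins)
--     memo = {}
--
--     # Memoized recursive interval value: best the mover gets from coins[i..j].
--     # Out-of-range or empty intervals are worth 0, which makes the recurrence
--     # uniform (no boundary branches).
--     def val(i, j):
--         if i < 0 or j >= n or j <= i:
--             return 0
--         if (i, j) in memo:
--             return memo[(i, j)]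
--         m = val(i + 1, j - 1)
--         r = max(coins[i] + min(val(i + 2, j), m),
--                 coins[j] + min(m, val(i, j - 2)))
--         memo[(i, j)] = r
--         return r
--
--     # Drive the recursion column by column so every call finds its
--     # subproblems already memoized (keeps the recursion shallow).
--     for j in range(1, n):
--         for i in range(j - 1, -1, -2):
--             val(i, j)
--
--     M = [[coins[i] if i == j else val(i, j) if (j - i) % 2 == 1 else 0
--           for j in range(n)]
--          for i in range(n)]
--     return M[0][n - 1], [M[0][j] for j in range(1, n, 2)], [M[i][n - 1] for i in range(0, n, 2)], M
-- ===== Notes on version B (the rewrite author's own statement) =====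
-- stated objective: alternative
-- what changed: A fills an n×n table bottom-up with boundary-guarded in-place updates and reads the answer out of the 2-D table; B is a top-down memoized recursive interval function val(i,j) with a uniform zero-for-out-of-range base case and a dict memo, driven column by column, with the returned matrix assembled afterwards by comprehension.
-- outside the precondition, e.g. on coins_in_a_line([]): A raises IndexError, B raises IndexError
import Mathlib
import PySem

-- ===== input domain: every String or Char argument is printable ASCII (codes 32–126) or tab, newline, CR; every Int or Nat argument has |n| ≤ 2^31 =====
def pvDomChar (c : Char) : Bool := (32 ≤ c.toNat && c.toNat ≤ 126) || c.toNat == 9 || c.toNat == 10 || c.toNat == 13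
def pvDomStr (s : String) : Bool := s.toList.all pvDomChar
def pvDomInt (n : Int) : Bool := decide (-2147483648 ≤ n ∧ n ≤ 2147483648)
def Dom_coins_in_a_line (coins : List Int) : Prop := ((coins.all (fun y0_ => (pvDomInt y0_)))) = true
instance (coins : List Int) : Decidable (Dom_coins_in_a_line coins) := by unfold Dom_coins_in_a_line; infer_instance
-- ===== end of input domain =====

-- B replaces A's bottom-up in-place table DP (boundary-guarded branches) with a top-down
-- memoized recursive interval function (uniform zero base case, dict memo) driven column by
-- column, the returned matrix assembled afterwards by comprehension; same value, different
-- decomposition.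

-- ===== PORT A =====
-- coins[i] / diag[i] read (every index the loops use is nonnegative and in range, where pyGetD is exact)
def pvC (coins : List Int) (i : Int) : Int := PySem.List.pyGetD coins i 0
-- M[i][j] read (in range at every use)
def pvG (M : List (List Int)) (i j : Int) : Int :=
  PySem.List.pyGetD (PySem.List.pyGetD M i []) j 0
-- M[i][j] = v (in range at every use)
def pvS (M : List (List Int)) (i j : Int) (v : Int) : List (List Int) :=
  PySem.List.pySetD M i (PySem.List.pySetD (PySem.List.pyGetD M i []) j v)

-- body of 'for i in range(n)': M[i][i] = coins[i]
def pvInit (coins : List Int) (M : List (List Int)) (i : Int) : List (List Int) :=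
  pvS M i i (pvC coins i)

-- body of 'for i in range(n-d+1)': the left/right/max assignment
def pvInner (coins : List Int) (n d : Int) (M : List (List Int)) (i : Int) : List (List Int) :=
  let j := i + d - 1
  let left := if i + 2 < n then
      pvC coins i + min (pvG M (i+2) j) (pvG M (i+1) (j-1))
    else
      pvC coins i + pvG M (i+1) (j-1)
  let right := if j - 2 ≥ 0 then
      pvC coins j + min (pvG M (i+1) (j-1)) (pvG M i (j-2))
    else
      pvC coins j + pvG M (i+1) (j-1)
  pvS M i j (max left right)

def coins_in_a_line (coins : List Int) : Int × List Int × List Int × List (List Int) :=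
  let n : Int := coins.length
  -- M = [[0]*n for _ in range(n)]
  let M0 : List (List Int) :=
    (PySem.List.pyRange 0 n 1).map (fun _ => List.replicate n.toNat (0 : Int))
  -- for i in range(n): M[i][i] = coins[i]
  let M1 := (PySem.List.pyRange 0 n 1).foldl (pvInit coins) M0
  -- for d in range(2, n+1, 2): for i in range(n-d+1): …
  let M2 := (PySem.List.pyRange 2 (n+1) 2).foldl (fun M d =>
      (PySem.List.pyRange 0 (n - d + 1) 1).foldl (pvInner coins n d) M) M1
  (pvG M2 0 (n-1),
   (PySem.List.pyRange 1 n 2).map (fun j => pvG M2 0 j),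
   (PySem.List.pyRange 0 n 2).map (fun i => pvG M2 i (n-1)),
   M2)

-- ===== PORT B =====
-- Source B's memoized recursive 'val', the mutable memo dict threaded through as state
def pvVal (coins : List Int) (n : Int) (memo : PySem.Dict (Int × Int) Int) (i j : Int) :
    Int × PySem.Dict (Int × Int) Int :=
  if i < 0 ∨ n ≤ j ∨ j ≤ i then (0, memo)
  else
    match memo.get? (i, j) with
    | some v => (v, memo)
    | none =>
      let pm := pvVal coins n memo (i + 1) (j - 1)      -- m = val(i+1, j-1)
      let p1 := pvVal coins n pm.2 (i + 2) j
      let p2 := pvVal coins n p1.2 i (j - 2)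
      let r := max (pvC coins i + min p1.1 pm.1) (pvC coins j + min pm.1 p2.1)
      (r, p2.2.insert (i, j) r)
termination_by (j - i).toNat
decreasing_by all_goals omega

def coins_in_a_line_alt (coins : List Int) : Int × List Int × List Int × List (List Int) :=
  let n : Int := coins.length
  -- memo = {}; for j in range(1, n): for i in range(j-1, -1, -2): val(i, j)
  let memo := (PySem.List.pyRange 1 n 1).foldl (fun m j =>
      (PySem.List.pyRange (j-1) (-1) (-2)).foldl (fun m i => (pvVal coins n m i j).2) m)
      PySem.Dict.empty
  -- the comprehension's val calls only hit the memo or the range guard, so the memo is unchanged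
  let M := (PySem.List.pyRange 0 n 1).map (fun i => (PySem.List.pyRange 0 n 1).map (fun j =>
      if i = j then pvC coins i
      else if PySem.Int.mod (j - i) 2 = 1 then (pvVal coins n memo i j).1 else 0))
  (pvG M 0 (n-1),
   (PySem.List.pyRange 1 n 2).map (fun j => pvG M 0 j),
   (PySem.List.pyRange 0 n 2).map (fun i => pvG M i (n-1)),
   M)

-- ===== PRECONDITION & SPEC =====
-- Pre_ excludes only the empty list, on which Python A raises IndexError (M[0][n-1] with n = 0).
def Pre_coins_in_a_line (coins : List Int) : Prop := coins ≠ []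
instance (coins : List Int) : Decidable (Pre_coins_in_a_line coins) := by
  unfold Pre_coins_in_a_line; infer_instance
def pvWitness_coins_in_a_line : List Int := [3, 1, 4, 1]

def Spec_coins_in_a_line (coins : List Int) (out : Int × List Int × List Int × List (List Int)) : Prop := out = coins_in_a_line_alt coins
instance (coins : List Int) (out : Int × List Int × List Int × List (List Int)) : Decidable (Spec_coins_in_a_line coins out) := by unfold Spec_coins_in_a_line; infer_instance

-- ===== CLAIM (what is proved, stated in full; the proofs are below) =====
def Claim_equal_coins_in_a_line : Prop := ∀ (coins : List Int), Dom_coins_in_a_line coins → Pre_coins_in_a_line coins → Spec_coins_in_a_line coins (coins_in_a_line coins)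

-- ===== LEMMAS AND PROOFS =====

-- the game value of the even-length interval of length d starting at i (the shared recurrence)
def pvV (coins : List Int) : Nat → Int → Int
  | 0, _ => 0
  | 1, _ => 0
  | (d+2), i =>
      max (pvC coins i             + min (pvV coins d (i+2)) (pvV coins d (i+1)))
          (pvC coins (i+(d:Int)+1) + min (pvV coins d (i+1)) (pvV coins d i))

-- the table after the diagonal and the first K even anti-diagonals have been filled
def pvTab (coins : List Int) (K : Nat) (a b : Int) : Int :=
  if a = b ∧ 0 ≤ a ∧ a < (coins.length : Int) then pvC coins a
  else if 0 ≤ a ∧ a < b ∧ b < (coins.length : Int) ∧ b - a + 1 ≤ 2*(K:Int) ∧ (b - a) % 2 = 1 then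
    pvV coins (b - a + 1).toNat a
  else 0

def pvMat (n : Int) (f : Int → Int → Int) : List (List Int) :=
  (PySem.List.pyRange 0 n 1).map (fun i => (PySem.List.pyRange 0 n 1).map (fun j => f i j))

theorem pvG_mat (n : Int) (f : Int → Int → Int) (i j : Int)
    (hi0 : 0 ≤ i) (hin : i < n) (hj0 : 0 ≤ j) (hjn : j < n) :
    pvG (pvMat n f) i j = f i j := by
  unfold pvG pvMat
  rw [PySem.List.pyGetD_map_pyRange_of_nonneg _ n i _ hi0 hin,
      PySem.List.pyGetD_map_pyRange_of_nonneg _ n j _ hj0 hjn]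

theorem pvSet_map_pyRange {α : Type} (n : Int) (g : Int → α) (j : Int) (v : α)
    (hj0 : 0 ≤ j) :
    ((PySem.List.pyRange 0 n 1).map g).set j.toNat v
      = (PySem.List.pyRange 0 n 1).map (fun b => if b = j then v else g b) := by
  apply List.ext_getElem
  · simp
  · intro k h1 h2
    rw [List.getElem_set]
    simp only [List.getElem_map, PySem.List.getElem_pyRange_one]
    by_cases h : (k:Int) = j
    · simp [show j.toNat = k by omega, show (0:Int) + (k:Int) = j by omega]
    · rw [if_neg (show ¬ (j.toNat = k) by omega),
          if_neg (show ¬ ((0:Int) + (k:Int) = j) by omega)]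

theorem pvMat_congr (n : Int) (f g : Int → Int → Int)
    (h : ∀ a b, 0 ≤ a → a < n → 0 ≤ b → b < n → f a b = g a b) :
    pvMat n f = pvMat n g := by
  unfold pvMat
  apply List.map_congr_left
  intro a ha
  have ha' := (PySem.List.mem_pyRange_one.mp ha)
  apply List.map_congr_left
  intro b hb
  have hb' := (PySem.List.mem_pyRange_one.mp hb)
  exact h a b ha'.1 ha'.2 hb'.1 hb'.2

theorem pvS_mat (n : Int) (f : Int → Int → Int) (i j v : Int)
    (hi0 : 0 ≤ i) (hin : i < n) (hj0 : 0 ≤ j) :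
    pvS (pvMat n f) i j v = pvMat n (fun a b => if a = i ∧ b = j then v else f a b) := by
  unfold pvS pvMat
  rw [PySem.List.pyGetD_map_pyRange_of_nonneg _ n i _ hi0 hin]
  rw [PySem.List.pySetD_of_nonneg _ _ hj0, PySem.List.pySetD_of_nonneg _ _ hi0]
  rw [pvSet_map_pyRange n _ j v hj0]
  rw [pvSet_map_pyRange n _ i _ hi0]
  apply List.map_congr_left
  intro a _
  by_cases h : a = i
  · subst h
    rw [if_pos rfl]
    apply List.map_congr_left
    intro b _
    by_cases hbj : b = j <;> simp [hbj]
  · rw [if_neg h]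
    apply List.map_congr_left
    intro b _
    have : ¬ (a = i ∧ b = j) := fun ⟨h1, _⟩ => h h1
    simp [this]

-- [0]*n is the constant-zero row
theorem pvRepl_eq_map (n : Int) :
    List.replicate n.toNat (0:Int) = (PySem.List.pyRange 0 n 1).map (fun _ => (0:Int)) := by
  apply List.ext_getElem
  · simp [PySem.List.length_pyRange_one]
  · intro k h1 h2
    simp

-- the diagonal-initialisation loop
theorem pvInit_loop (coins : List Int) (f : Int → Int → Int) :
    ∀ (m : Nat), (m:Int) ≤ (coins.length:Int) →
    (PySem.List.pyRange 0 (m:Int) 1).foldl (pvInit coins) (pvMat (coins.length:Int) f)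
      = pvMat (coins.length:Int)
          (fun a b => if a = b ∧ 0 ≤ a ∧ a < (m:Int) then pvC coins a else f a b) := by
  intro m
  induction m with
  | zero =>
      intro _
      rw [PySem.List.pyRange_one_eq_nil (by norm_num)]
      simp only [List.foldl_nil]
      apply pvMat_congr
      intro a b _ _ _ _
      rw [if_neg (by omega)]
  | succ m ih =>
      intro hm
      have hm' : (m:Int) ≤ (coins.length:Int) := by push_cast at hm ⊢; omega
      rw [show ((m+1:Nat):Int) = (m:Int) + 1 by push_cast; ring]
      rw [PySem.List.pyRange_one_succ_right (by positivity), List.foldl_append]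
      rw [ih hm']
      show pvInit coins _ (m:Int) = _
      unfold pvInit
      rw [pvS_mat _ _ _ _ _ (by positivity) (by push_cast at hm; omega) (by positivity)]
      apply pvMat_congr
      intro a b _ _ _ _
      by_cases h : a = (m:Int) ∧ b = (m:Int)
      · rw [if_pos h, if_pos (by omega)]
        rw [h.1]
      · rw [if_neg h]
        by_cases h2 : a = b ∧ 0 ≤ a ∧ a < (m:Int)
        · rw [if_pos h2, if_pos (by omega)]
        · rw [if_neg h2, if_neg (by omega)]

-- pvTab at the three read positions of the recurrence: one diagonal back
theorem pvTab_read (coins : List Int) (k : Nat) (a b : Int)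
    (ha : 0 ≤ a) (hb : b < (coins.length:Int)) (hab : b - a = 2*(k:Int) - 1) :
    pvTab coins k a b = pvV coins (2*k) a := by
  unfold pvTab
  rcases Nat.eq_zero_or_pos k with hk | hk
  · subst hk
    rw [if_neg (by omega), if_neg (by omega)]
    rfl
  · rw [if_neg (by omega), if_pos ⟨ha, by omega, hb, by omega, by omega⟩]
    congr 1
    omega


theorem pvInner_step (coins : List Int) (k : Nat) (m' : Int) (h0 : 0 ≤ m')
    (hdn : 2*(k:Int)+2 ≤ (coins.length:Int))
    (hm : m' + 1 ≤ (coins.length:Int) - (2*(k:Int)+2) + 1) :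
    pvInner coins (coins.length:Int) (2*(k:Int)+2)
        (pvMat (coins.length:Int)
          (fun a b => if b = a + (2*(k:Int)+2) - 1 ∧ 0 ≤ a ∧ a < m' then pvV coins (2*k+2) a
                      else pvTab coins k a b)) m'
      = pvMat (coins.length:Int)
          (fun a b => if b = a + (2*(k:Int)+2) - 1 ∧ 0 ≤ a ∧ a < m' + 1 then pvV coins (2*k+2) a
                      else pvTab coins k a b) := by
  have hn : m' + (2*(k:Int)+2) ≤ (coins.length:Int) := by omega
  simp only [pvInner]
  -- the read that occurs in every branch
  have e2 : pvG (pvMat (coins.length:Int)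
        (fun a b => if b = a + (2*(k:Int)+2) - 1 ∧ 0 ≤ a ∧ a < m' then pvV coins (2*k+2) a
                    else pvTab coins k a b)) (m'+1) (m' + (2*(k:Int)+2) - 1 - 1)
      = pvV coins (2*k) (m'+1) := by
    rw [pvG_mat _ _ _ _ (by omega) (by omega) (by omega) (by omega)]
    rw [if_neg (by omega)]
    exact pvTab_read coins k _ _ (by omega) (by omega) (by omega)
  rw [e2]
  have hfin : ∀ v, v = pvV coins (2*k+2) m' →
      pvS (pvMat (coins.length:Int)
          (fun a b => if b = a + (2*(k:Int)+2) - 1 ∧ 0 ≤ a ∧ a < m' then pvV coins (2*k+2) a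
                      else pvTab coins k a b)) m' (m' + (2*(k:Int)+2) - 1) v
        = pvMat (coins.length:Int)
          (fun a b => if b = a + (2*(k:Int)+2) - 1 ∧ 0 ≤ a ∧ a < m' + 1 then pvV coins (2*k+2) a
                      else pvTab coins k a b) := by
    intro v hv
    rw [pvS_mat _ _ _ _ _ h0 (by omega) (by omega)]
    apply pvMat_congr
    intro a b _ _ _ _
    by_cases hab : a = m' ∧ b = m' + (2*(k:Int)+2) - 1
    · rw [if_pos hab, if_pos (by omega)]
      rw [hv, hab.1]
    · rw [if_neg hab]
      by_cases h2 : b = a + (2*(k:Int)+2) - 1 ∧ 0 ≤ a ∧ a < m'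
      · rw [if_pos h2, if_pos (by omega)]
      · rw [if_neg h2, if_neg (by omega)]
  have hVeq : pvV coins (2*k+2) m'
      = max (pvC coins m' + min (pvV coins (2*k) (m'+2)) (pvV coins (2*k) (m'+1)))
            (pvC coins (m' + (2*(k:Int)+2) - 1) + min (pvV coins (2*k) (m'+1)) (pvV coins (2*k) m')) := by
    have he : m' + (2*(k:Int)+2) - 1 = m' + ((2*k : Nat) : Int) + 1 := by push_cast; ring
    rw [he]
    rfl
  by_cases hg1 : m' + 2 < (coins.length:Int)
  · have e1 : pvG (pvMat (coins.length:Int)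
          (fun a b => if b = a + (2*(k:Int)+2) - 1 ∧ 0 ≤ a ∧ a < m' then pvV coins (2*k+2) a
                      else pvTab coins k a b)) (m'+2) (m' + (2*(k:Int)+2) - 1)
        = pvV coins (2*k) (m'+2) := by
      rw [pvG_mat _ _ _ _ (by omega) (by omega) (by omega) (by omega)]
      rw [if_neg (by omega)]
      exact pvTab_read coins k _ _ (by omega) (by omega) (by omega)
    rw [if_pos hg1, e1]
    by_cases hg2 : m' + (2*(k:Int)+2) - 1 - 2 ≥ 0
    · have e3 : pvG (pvMat (coins.length:Int)
            (fun a b => if b = a + (2*(k:Int)+2) - 1 ∧ 0 ≤ a ∧ a < m' then pvV coins (2*k+2) a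
                        else pvTab coins k a b)) m' (m' + (2*(k:Int)+2) - 1 - 2)
          = pvV coins (2*k) m' := by
        rw [pvG_mat _ _ _ _ (by omega) (by omega) (by omega) (by omega)]
        rw [if_neg (by omega)]
        exact pvTab_read coins k _ _ (by omega) (by omega) (by omega)
      rw [if_pos hg2, e3]
      exact hfin _ hVeq.symm
    · -- j - 2 < 0 forces d = 2 (k = 0) and m' = 0
      have hk0 : k = 0 := by omega
      have hm0 : m' = 0 := by omega
      subst hk0; subst hm0
      rw [if_neg hg2]
      apply hfin
      rw [hVeq]
      simp [pvV]
  · -- m' + 2 ≥ n forces d = 2 (k = 0)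
    have hk0 : k = 0 := by omega
    subst hk0
    rw [if_neg hg1]
    by_cases hg2 : m' + (2*((0:Nat):Int)+2) - 1 - 2 ≥ 0
    · have e3 : pvG (pvMat (coins.length:Int)
            (fun a b => if b = a + (2*((0:Nat):Int)+2) - 1 ∧ 0 ≤ a ∧ a < m' then pvV coins (2*0+2) a
                        else pvTab coins 0 a b)) m' (m' + (2*((0:Nat):Int)+2) - 1 - 2)
          = pvV coins (2*0) m' := by
        rw [pvG_mat _ _ _ _ (by omega) (by omega) (by omega) (by omega)]
        rw [if_neg (by omega)]
        exact pvTab_read coins 0 _ _ (by omega) (by omega) (by omega)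
      rw [if_pos hg2, e3]
      apply hfin
      rw [hVeq]
      simp [pvV]
    · rw [if_neg hg2]
      apply hfin
      rw [hVeq]
      simp [pvV]

theorem pvInner_loop (coins : List Int) (k : Nat)
    (hdn : 2*(k:Int)+2 ≤ (coins.length:Int)) :
    ∀ (m : Nat), (m:Int) ≤ (coins.length:Int) - (2*(k:Int)+2) + 1 →
    (PySem.List.pyRange 0 (m:Int) 1).foldl (pvInner coins (coins.length:Int) (2*(k:Int)+2))
        (pvMat (coins.length:Int) (pvTab coins k))
      = pvMat (coins.length:Int)
          (fun a b => if b = a + (2*(k:Int)+2) - 1 ∧ 0 ≤ a ∧ a < (m:Int) then pvV coins (2*k+2) a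
                      else pvTab coins k a b) := by
  intro m
  induction m with
  | zero =>
      intro _
      rw [PySem.List.pyRange_one_eq_nil (by norm_num)]
      simp only [List.foldl_nil]
      apply pvMat_congr
      intro a b _ _ _ _
      rw [if_neg (by omega)]
  | succ m ih =>
      intro hm
      have hm' : (m:Int) ≤ (coins.length:Int) - (2*(k:Int)+2) + 1 := by push_cast at hm ⊢; omega
      rw [show ((m+1:Nat):Int) = (m:Int) + 1 by push_cast; ring]
      rw [PySem.List.pyRange_one_succ_right (by positivity), List.foldl_append]
      rw [ih hm']
      show pvInner _ _ _ _ (m:Int) = _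
      rw [pvInner_step coins k (m:Int) (by positivity) hdn (by push_cast at hm; omega)]

theorem pvOuter_loop (coins : List Int) :
    ∀ (K : Nat), 2*(K:Int) ≤ (coins.length:Int) →
    (List.range K).foldl
        (fun M (kk : Nat) => (PySem.List.pyRange 0 ((coins.length:Int) - (2+2*(kk:Int)) + 1) 1).foldl
            (pvInner coins (coins.length:Int) (2+2*(kk:Int))) M)
        (pvMat (coins.length:Int) (pvTab coins 0))
      = pvMat (coins.length:Int) (pvTab coins K) := by
  intro K
  induction K with
  | zero => intro _; simp
  | succ K ih =>
      intro hK
      have hK' : 2*((K:Nat):Int) ≤ (coins.length:Int) := by push_cast at hK ⊢; omega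
      rw [List.range_succ, List.foldl_append, ih hK']
      show (PySem.List.pyRange 0 ((coins.length:Int) - (2+2*(K:Int)) + 1) 1).foldl
            (pvInner coins (coins.length:Int) (2+2*(K:Int))) _ = _
      have hd2 : (2+2*(K:Int)) = 2*(K:Int)+2 := by ring
      rw [hd2]
      have hmn : (((coins.length:Int) - (2*(K:Int)+2) + 1).toNat : Int)
          = (coins.length:Int) - (2*(K:Int)+2) + 1 := by push_cast at hK; omega
      rw [show (coins.length:Int) - (2*(K:Int)+2) + 1
            = (((coins.length:Int) - (2*(K:Int)+2) + 1).toNat : Int) from hmn.symm]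
      rw [pvInner_loop coins K (by push_cast at hK; omega) _ (by rw [hmn])]
      apply pvMat_congr
      intro a b ha0 han hb0 hbn
      by_cases h1 : b = a + (2*(K:Int)+2) - 1 ∧ 0 ≤ a ∧ a < (coins.length:Int) - (2*(K:Int)+2) + 1
      · rw [if_pos (by rw [hmn]; exact h1)]
        unfold pvTab
        rw [if_neg (by omega), if_pos ⟨h1.2.1, by omega, by omega, by push_cast; omega, by omega⟩]
        congr 1
        omega
      · rw [if_neg (by rw [hmn]; exact h1)]
        unfold pvTab
        by_cases h2 : a = b ∧ 0 ≤ a ∧ a < (coins.length:Int)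
        · rw [if_pos h2, if_pos h2]
        · rw [if_neg h2, if_neg h2]
          by_cases h3 : 0 ≤ a ∧ a < b ∧ b < (coins.length:Int) ∧ b - a + 1 ≤ 2*((K:Nat):Int) ∧ (b-a) % 2 = 1
          · rw [if_pos h3, if_pos (by push_cast at h3 ⊢; omega)]
          · rw [if_neg h3, if_neg (by push_cast at h3 ⊢; omega)]

-- range(2, n+1, 2) as a mapped List.range
theorem pvRange2 (n : Int) (hn : 0 ≤ n) :
    PySem.List.pyRange 2 (n+1) 2 = (List.range (n/2).toNat).map (fun (k : Nat) => 2 + 2*(k:Int)) := by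
  rw [PySem.List.pyRange_of_pos _ _ (by norm_num)]
  have : (if (2:Int) < n+1 then ((n+1-2+2-1)/2).toNat else 0) = (n/2).toNat := by
    split_ifs with h <;> omega
  rw [this]

theorem pvA_eq (coins : List Int) :
    coins_in_a_line coins
      = (pvG (pvMat (coins.length:Int) (pvTab coins (((coins.length:Int))/2).toNat)) 0 ((coins.length:Int)-1),
         (PySem.List.pyRange 1 (coins.length:Int) 2).map (fun j =>
           pvG (pvMat (coins.length:Int) (pvTab coins (((coins.length:Int))/2).toNat)) 0 j),
         (PySem.List.pyRange 0 (coins.length:Int) 2).map (fun i =>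
           pvG (pvMat (coins.length:Int) (pvTab coins (((coins.length:Int))/2).toNat)) i ((coins.length:Int)-1)),
         pvMat (coins.length:Int) (pvTab coins (((coins.length:Int))/2).toNat)) := by
  simp only [coins_in_a_line]
  have h0 : ((PySem.List.pyRange 0 ((coins.length:Int)) 1).map
        (fun _ => List.replicate ((coins.length:Int)).toNat (0:Int)))
      = pvMat (coins.length:Int) (fun _ _ => 0) := by
    unfold pvMat
    apply List.map_congr_left
    intro a _
    rw [pvRepl_eq_map]
  rw [h0]
  have h1 : (PySem.List.pyRange 0 ((coins.length:Int)) 1).foldl (pvInit coins)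
        (pvMat (coins.length:Int) (fun _ _ => (0:Int)))
      = pvMat (coins.length:Int) (pvTab coins 0) := by
    have hl := pvInit_loop coins (fun _ _ => 0) coins.length (by omega)
    rw [hl]
    apply pvMat_congr
    intro a b _ _ _ _
    unfold pvTab
    by_cases h : a = b ∧ 0 ≤ a ∧ a < ((coins.length:Nat):Int)
    · rw [if_pos h, if_pos (by exact_mod_cast h)]
    · rw [if_neg h, if_neg (by exact_mod_cast h), if_neg (by push_cast; omega)]
  rw [h1]
  have h2 : (PySem.List.pyRange 2 ((coins.length:Int)+1) 2).foldl
        (fun M d => (PySem.List.pyRange 0 ((coins.length:Int) - d + 1) 1).foldl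
          (pvInner coins (coins.length:Int) d) M)
        (pvMat (coins.length:Int) (pvTab coins 0))
      = pvMat (coins.length:Int) (pvTab coins (((coins.length:Int))/2).toNat) := by
    rw [pvRange2 _ (by positivity), List.foldl_map]
    exact pvOuter_loop coins _ (by omega)
  rw [h2]

-- ===== B-side lemmas =====

-- what val(i, j) returns: the interval value for an in-range nonempty interval, 0 otherwise
def pvW (coins : List Int) (n i j : Int) : Int :=
  if 0 ≤ i ∧ i < j ∧ j < n then pvV coins (j - i + 1).toNat i else 0

-- every memo entry is correct
def pvGood (coins : List Int) (n : Int) (memo : PySem.Dict (Int × Int) Int) : Prop :=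
  ∀ p v, memo.get? p = some v → v = pvW coins n p.1 p.2

theorem pvW_val (coins : List Int) (n a b : Int) (h0 : 0 ≤ a) (hb : b < n) :
    pvW coins n a b = pvV coins (b - a + 1).toNat a := by
  unfold pvW
  split_ifs with h
  · rfl
  · have : (b - a + 1).toNat = 0 ∨ (b - a + 1).toNat = 1 := by omega
    rcases this with h1 | h1 <;> rw [h1] <;> rfl

theorem pvV_two (coins : List Int) (d : Nat) (i : Int) :
    pvV coins (d+2) i
      = max (pvC coins i             + min (pvV coins d (i+2)) (pvV coins d (i+1)))
            (pvC coins (i+(d:Int)+1) + min (pvV coins d (i+1)) (pvV coins d i)) := rfl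

theorem pvVal_spec (coins : List Int) (n : Int) :
    ∀ (k : Nat) (i j : Int) (memo : PySem.Dict (Int × Int) Int),
      (j - i).toNat ≤ k → pvGood coins n memo →
      (pvVal coins n memo i j).1 = pvW coins n i j
        ∧ pvGood coins n (pvVal coins n memo i j).2 := by
  intro k
  induction k with
  | zero =>
      intro i j memo hk hg
      rw [pvVal]
      rw [if_pos (by omega)]
      refine ⟨?_, hg⟩
      unfold pvW
      rw [if_neg (by omega)]
  | succ k ih =>
      intro i j memo hk hg
      rw [pvVal]
      by_cases hgd : i < 0 ∨ n ≤ j ∨ j ≤ i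
      · rw [if_pos hgd]
        refine ⟨?_, hg⟩
        unfold pvW
        rw [if_neg (by omega)]
      · rw [if_neg hgd]
        have hi0 : 0 ≤ i := by omega
        have hjn : j < n := by omega
        have hij : i < j := by omega
        rcases hmemo : memo.get? (i, j) with _ | v
        · -- none branch: the three recursive calls
          simp only []
          obtain ⟨hm1, hg1⟩ := ih (i+1) (j-1) memo (by omega) hg
          obtain ⟨hm2, hg2⟩ := ih (i+2) j _ (by omega) hg1
          obtain ⟨hm3, hg3⟩ := ih i (j-2) _ (by omega) hg2
          have hr : max (pvC coins i + min (pvVal coins n (pvVal coins n memo (i+1) (j-1)).2 (i+2) j).1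
                                           (pvVal coins n memo (i+1) (j-1)).1)
                        (pvC coins j + min (pvVal coins n memo (i+1) (j-1)).1
                                           (pvVal coins n (pvVal coins n (pvVal coins n memo (i+1) (j-1)).2 (i+2) j).2 i (j-2)).1)
              = pvW coins n i j := by
            rw [hm1, hm2, hm3]
            rw [pvW_val coins n (i+1) (j-1) (by omega) (by omega)]
            rw [pvW_val coins n (i+2) j (by omega) (by omega)]
            rw [pvW_val coins n i (j-2) (by omega) (by omega)]
            rw [pvW_val coins n i j (by omega) (by omega)]
            have e1 : (j - 1 - (i+1) + 1).toNat = (j - i - 1).toNat := by omega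
            have e2 : (j - (i+2) + 1).toNat = (j - i - 1).toNat := by omega
            have e3 : (j - 2 - i + 1).toNat = (j - i - 1).toNat := by omega
            have e0 : (j - i + 1).toNat = (j - i - 1).toNat + 2 := by omega
            rw [e1, e2, e3, e0, pvV_two]
            have ej : i + (((j - i - 1).toNat : Nat) : Int) + 1 = j := by omega
            rw [ej]
          constructor
          · exact hr
          · intro p v hpv
            rw [PySem.Dict.get?_insert] at hpv
            by_cases hp : p = (i, j)
            · rw [if_pos hp] at hpv
              cases hpv
              rw [hp]
              exact hr
            · rw [if_neg hp] at hpv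
              exact hg3 p v hpv
        · -- memo hit
          simp only []
          exact ⟨hg (i, j) v hmemo, hg⟩

-- the driver loops only ever fold correct memo states
theorem pvGood_inner (coins : List Int) (n j : Int) :
    ∀ (l : List Int) (m : PySem.Dict (Int × Int) Int), pvGood coins n m →
      pvGood coins n (l.foldl (fun m i => (pvVal coins n m i j).2) m) := by
  intro l
  induction l with
  | nil => intro m hm; exact hm
  | cons x xs ih =>
      intro m hm
      exact ih _ ((pvVal_spec coins n (j - x).toNat x j m (le_refl _) hm).2)

theorem pvGood_outer (coins : List Int) (n : Int) :
    ∀ (l : List Int) (m : PySem.Dict (Int × Int) Int), pvGood coins n m →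
      pvGood coins n (l.foldl (fun m j =>
        (PySem.List.pyRange (j-1) (-1) (-2)).foldl (fun m i => (pvVal coins n m i j).2) m) m) := by
  intro l
  induction l with
  | nil => intro m hm; exact hm
  | cons x xs ih =>
      intro m hm
      exact ih _ (pvGood_inner coins n x _ m hm)

theorem pvGood_empty (coins : List Int) (n : Int) : pvGood coins n PySem.Dict.empty := by
  intro p v h
  rw [PySem.Dict.get?_empty] at h
  cases h

theorem pvMod2 (a : Int) : PySem.Int.mod a 2 = a % 2 := by
  unfold PySem.Int.mod
  rw [Int.fmod_eq_emod]
  simp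

theorem pvB_eq (coins : List Int) :
    coins_in_a_line_alt coins
      = (pvG (pvMat (coins.length:Int) (pvTab coins (((coins.length:Int))/2).toNat)) 0 ((coins.length:Int)-1),
         (PySem.List.pyRange 1 (coins.length:Int) 2).map (fun j =>
           pvG (pvMat (coins.length:Int) (pvTab coins (((coins.length:Int))/2).toNat)) 0 j),
         (PySem.List.pyRange 0 (coins.length:Int) 2).map (fun i =>
           pvG (pvMat (coins.length:Int) (pvTab coins (((coins.length:Int))/2).toNat)) i ((coins.length:Int)-1)),
         pvMat (coins.length:Int) (pvTab coins (((coins.length:Int))/2).toNat)) := by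
  simp only [coins_in_a_line_alt]
  have hgood : pvGood coins (coins.length:Int)
      ((PySem.List.pyRange 1 (coins.length:Int) 1).foldl (fun m j =>
        (PySem.List.pyRange (j-1) (-1) (-2)).foldl
          (fun m i => (pvVal coins (coins.length:Int) m i j).2) m) PySem.Dict.empty) :=
    pvGood_outer coins _ _ _ (pvGood_empty coins _)
  have hM : ((PySem.List.pyRange 0 ((coins.length:Int)) 1).map (fun i =>
        (PySem.List.pyRange 0 ((coins.length:Int)) 1).map (fun j =>
          if i = j then pvC coins i
          else if PySem.Int.mod (j - i) 2 = 1 then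
            (pvVal coins (coins.length:Int)
              ((PySem.List.pyRange 1 (coins.length:Int) 1).foldl (fun m j =>
                (PySem.List.pyRange (j-1) (-1) (-2)).foldl
                  (fun m i => (pvVal coins (coins.length:Int) m i j).2) m) PySem.Dict.empty)
              i j).1
          else 0)))
      = pvMat (coins.length:Int) (pvTab coins (((coins.length:Int))/2).toNat) := by
    apply pvMat_congr
    intro i j hi0 hin hj0 hjn
    by_cases hij : i = j
    · rw [if_pos hij]
      unfold pvTab
      rw [if_pos ⟨hij, hi0, hin⟩]
    · rw [if_neg hij, pvMod2]
      by_cases hodd : (j - i) % 2 = 1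
      · rw [if_pos hodd]
        rw [(pvVal_spec coins (coins.length:Int) (j - i).toNat i j _ (le_refl _) hgood).1]
        unfold pvW pvTab
        by_cases hlt : i < j
        · rw [if_pos ⟨hi0, hlt, hjn⟩,
              if_neg (by omega), if_pos ⟨hi0, hlt, hjn, by omega, hodd⟩]
        · rw [if_neg (by omega), if_neg (by omega), if_neg (by omega)]
      · rw [if_neg hodd]
        unfold pvTab
        rw [if_neg (by omega), if_neg (by omega)]
  rw [hM]

-- ===== VERDICT (by name: the statement is the Claim_ definition above) =====
theorem coins_in_a_line_spec : Claim_equal_coins_in_a_line := by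
  intro coins _ _
  unfold Spec_coins_in_a_line
  rw [pvA_eq, pvB_eq]
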